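-- pv_equiv track=rewrite | github.com/agaberr/ZAAM | server/routes/reminder_routes.py | postprocess_ner_predictions
-- ===== SOURCE A (Python) =====
-- def postprocess_ner_predictions(predicted_intent, predicted_tokens, predicted_slots):
--     predicted_time, predicted_action = [], []
--     current_action = []
--     current_time = []
--
--     # Iterate through tokens and their predicted slots
--     for i, (token, slot) in enumerate(zip(predicted_tokens, predicted_slots)):
--         if slot == 'B-action' or slot == 'I-action':
--             current_action.append(token)
--         elif slot == 'B-time' or slot == 'I-time':
--             current_time.append(token)
--         elif (slot == 'O' or 'B-' in slot) and (current_action or current_time):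
--             # We've reached the end of an entity
--             if current_action:
--                 predicted_action = current_action
--                 current_action = []
--             if current_time:
--                 predicted_time = current_time
--                 current_time = []
--
--     # Handle any entities at the end of the sequence
--     if current_action:
--         predicted_action = current_action
--     if current_time:
--         predicted_time = current_time
--
--     # Join tokens to form entity strings
--     result = {
--         "predicted_intent": predicted_intent,
--         "predicted_time": " ".join(predicted_time) if predicted_time else None,
--         "predicted_action": " ".join(predicted_action) if predicted_action else None,
--     }
--
--     return result
-- ===== SOURCE B (Python) =====
-- def postprocess_ner_predictions(predicted_intent, predicted_tokens, predicted_slots):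
--     # Phase 1: segment the token stream into groups of (action tokens, time tokens).
--     segments = []
--     cur_action, cur_time = [], []
--     for token, slot in zip(predicted_tokens, predicted_slots):
--         if slot == 'B-action' or slot == 'I-action':
--             cur_action.append(token)
--         elif slot == 'B-time' or slot == 'I-time':
--             cur_time.append(token)
--         elif (slot == 'O' or 'B-' in slot) and (cur_action or cur_time):
--             segments.append((cur_action, cur_time))
--             cur_action, cur_time = [], []
--     if cur_action or cur_time:
--         segments.append((cur_action, cur_time))
--     # Phase 2: the answer is the last group with action tokens / with time tokens.
--     action = next((a for a, _ in reversed(segments) if a), None)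
--     time = next((t for _, t in reversed(segments) if t), None)
--     return {
--         "predicted_intent": predicted_intent,
--         "predicted_time": " ".join(time) if time else None,
--         "predicted_action": " ".join(action) if action else None,
--     }
-- ===== Notes on version B (the rewrite author's own statement) =====
-- stated objective: alternative
-- what changed: Replaces A's four mutable lists with inline overwrites by a two-phase decomposition: phase 1 builds an explicit list of entity segments, phase 2 selects the last segment with action/time tokens by a reversed search.
import Mathlib
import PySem

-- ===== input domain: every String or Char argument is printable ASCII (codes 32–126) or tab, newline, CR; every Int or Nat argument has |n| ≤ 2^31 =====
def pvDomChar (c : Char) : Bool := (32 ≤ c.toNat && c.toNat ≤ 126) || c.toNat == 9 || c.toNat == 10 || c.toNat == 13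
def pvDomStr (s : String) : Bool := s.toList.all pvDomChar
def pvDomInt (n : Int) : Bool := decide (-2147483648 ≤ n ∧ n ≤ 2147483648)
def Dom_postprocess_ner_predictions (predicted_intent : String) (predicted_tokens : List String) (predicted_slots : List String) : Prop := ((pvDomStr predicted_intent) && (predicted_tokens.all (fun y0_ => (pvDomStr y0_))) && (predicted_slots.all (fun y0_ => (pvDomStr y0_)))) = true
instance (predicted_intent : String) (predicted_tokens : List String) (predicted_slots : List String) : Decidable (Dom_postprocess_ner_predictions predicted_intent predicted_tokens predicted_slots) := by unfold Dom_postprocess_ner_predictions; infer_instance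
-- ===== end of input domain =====

-- B replaces A's four inline-overwritten lists by two phases (build explicit entity
-- segments, then pick the last nonempty one by a reversed search); alternative, same cost.

-- ===== PORT A =====
-- the body of A's for-loop: state is (predicted_time, predicted_action, current_action, current_time)
def pvAStep (st : List String × List String × List String × List String) (p : String × String) :
    List String × List String × List String × List String :=
  let (pt, pa, ca, ct) := st
  let (token, slot) := p
  if slot = "B-action" ∨ slot = "I-action" then (pt, pa, ca ++ [token], ct)
  else if slot = "B-time" ∨ slot = "I-time" then (pt, pa, ca, ct ++ [token])
  else if (slot = "O" ∨ PySem.Str.isIn "B-" slot) ∧ (ca ≠ [] ∨ ct ≠ []) then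
    -- 'if current_action: predicted_action = current_action; current_action = []' and the same for time
    ((if ct ≠ [] then ct else pt), (if ca ≠ [] then ca else pa),
     (if ca ≠ [] then ([] : List String) else ca), (if ct ≠ [] then ([] : List String) else ct))
  else (pt, pa, ca, ct)

def postprocess_ner_predictions (predicted_intent : String) (predicted_tokens : List String) (predicted_slots : List String) : List (String × Option String) :=
  let st := (predicted_tokens.zip predicted_slots).foldl pvAStep ([], [], [], [])
  -- st = (predicted_time, predicted_action, current_action, current_time); final flush:
  let pa := if st.2.2.1 ≠ [] then st.2.2.1 else st.2.1
  let pt := if st.2.2.2 ≠ [] then st.2.2.2 else st.1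
  [("predicted_intent", some predicted_intent),
   ("predicted_time", if pt ≠ [] then some (PySem.Str.join " " pt) else none),
   ("predicted_action", if pa ≠ [] then some (PySem.Str.join " " pa) else none)]

-- ===== PORT B =====
-- phase 1: segment the token stream into groups of (action tokens, time tokens)
def pvSegments : List (String × String) → List String → List String → List (List String × List String)
  | [], ca, ct => if ca ≠ [] ∨ ct ≠ [] then [(ca, ct)] else []
  | (token, slot) :: rest, ca, ct =>
    if slot = "B-action" ∨ slot = "I-action" then pvSegments rest (ca ++ [token]) ct
    else if slot = "B-time" ∨ slot = "I-time" then pvSegments rest ca (ct ++ [token])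
    else if (slot = "O" ∨ PySem.Str.isIn "B-" slot) ∧ (ca ≠ [] ∨ ct ≠ []) then
      (ca, ct) :: pvSegments rest [] []
    else pvSegments rest ca ct

def postprocess_ner_predictions_alt (predicted_intent : String) (predicted_tokens : List String) (predicted_slots : List String) : List (String × Option String) :=
  let segs := pvSegments (predicted_tokens.zip predicted_slots) [] []
  -- phase 2: last group with action tokens / with time tokens (reversed search)
  let action := (segs.reverse.find? (fun g => !g.1.isEmpty)).map (·.1)
  let time := (segs.reverse.find? (fun g => !g.2.isEmpty)).map (·.2)
  [("predicted_intent", some predicted_intent),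
   ("predicted_time", time.map (fun l => PySem.Str.join " " l)),
   ("predicted_action", action.map (fun l => PySem.Str.join " " l))]

-- ===== PRECONDITION & SPEC =====
def Spec_postprocess_ner_predictions (predicted_intent : String) (predicted_tokens : List String) (predicted_slots : List String) (out : List (String × Option String)) : Prop := out = postprocess_ner_predictions_alt predicted_intent predicted_tokens predicted_slots
instance (predicted_intent : String) (predicted_tokens : List String) (predicted_slots : List String) (out : List (String × Option String)) : Decidable (Spec_postprocess_ner_predictions predicted_intent predicted_tokens predicted_slots out) := by unfold Spec_postprocess_ner_predictions; infer_instance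

-- ===== CLAIM (what is proved, stated in full; the proofs are below) =====
def Claim_equal_postprocess_ner_predictions : Prop := ∀ (predicted_intent : String) (predicted_tokens : List String) (predicted_slots : List String), Dom_postprocess_ner_predictions predicted_intent predicted_tokens predicted_slots → Spec_postprocess_ner_predictions predicted_intent predicted_tokens predicted_slots (postprocess_ner_predictions predicted_intent predicted_tokens predicted_slots)

-- ===== LEMMAS AND PROOFS =====

-- the invariant: at any point of the loop, A's "final answer if we stopped here" equals
-- the last nonempty component among the segments B would still produce, defaulting to
-- A's already-flushed value.
theorem pv_main (ps : List (String × String)) :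
    ∀ pt pa ca ct : List String,
    ((if ¬(ps.foldl pvAStep (pt, pa, ca, ct)).2.2.1 = [] then (ps.foldl pvAStep (pt, pa, ca, ct)).2.2.1 else (ps.foldl pvAStep (pt, pa, ca, ct)).2.1),
     (if ¬(ps.foldl pvAStep (pt, pa, ca, ct)).2.2.2 = [] then (ps.foldl pvAStep (pt, pa, ca, ct)).2.2.2 else (ps.foldl pvAStep (pt, pa, ca, ct)).1)) =
    ((((pvSegments ps ca ct).reverse.find? (fun g => !g.1.isEmpty)).elim pa (·.1)),
     (((pvSegments ps ca ct).reverse.find? (fun g => !g.2.isEmpty)).elim pt (·.2))) := by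
  induction ps with
  | nil =>
      intro pt pa ca ct
      simp only [List.foldl_nil, pvSegments]
      by_cases hca : ca = [] <;> by_cases hct : ct = [] <;>
        simp [hca, hct, List.find?, Option.elim]
  | cons p rest ih =>
      intro pt pa ca ct
      obtain ⟨token, slot⟩ := p
      simp only [List.foldl_cons, pvSegments, pvAStep]
      by_cases h1 : slot = "B-action" ∨ slot = "I-action"
      · simp only [if_pos h1]
        exact ih pt pa (ca ++ [token]) ct
      · simp only [if_neg h1]
        by_cases h2 : slot = "B-time" ∨ slot = "I-time"
        · simp only [if_pos h2]
          exact ih pt pa ca (ct ++ [token])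
        · simp only [if_neg h2]
          by_cases h3 : (slot = "O" ∨ PySem.Str.isIn "B-" slot = true) ∧ (ca ≠ [] ∨ ct ≠ [])
          · simp only [if_pos h3]
            by_cases hca : ca = [] <;> by_cases hct : ct = []
            · exact absurd h3.2 (by simp [hca, hct])
            all_goals
              simp only [hca, hct, ne_eq, not_true_eq_false, not_false_eq_true,
                if_true, if_false]
            all_goals
              rw [ih]
              cases hfa : (pvSegments rest [] []).reverse.find? (fun g => !g.1.isEmpty) <;>
              cases hft : (pvSegments rest [] []).reverse.find? (fun g => !g.2.isEmpty) <;>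
              simp [List.reverse_cons, List.find?_append, hfa, hft, Option.elim, hca, hct]
          · simp only [if_neg h3]
            exact ih pt pa ca ct

-- ===== VERDICT (by name: the statement is the Claim_ definition above) =====
theorem postprocess_ner_predictions_spec : Claim_equal_postprocess_ner_predictions := by
  intro pi toks slots _
  unfold Spec_postprocess_ner_predictions postprocess_ner_predictions postprocess_ner_predictions_alt
  have h := pv_main (toks.zip slots) [] [] [] []
  have h1 := congrArg Prod.fst h
  have h2 := congrArg Prod.snd h
  dsimp only at h1 h2
  simp only [ne_eq]
  rw [h1, h2]
  cases hfa : (pvSegments (toks.zip slots) [] []).reverse.find? (fun g => !g.1.isEmpty) with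
  | none =>
      cases hft : (pvSegments (toks.zip slots) [] []).reverse.find? (fun g => !g.2.isEmpty) with
      | none => simp [Option.elim]
      | some gt =>
          have hg : ¬gt.2 = [] := by simpa using List.find?_some hft
          simp [Option.elim, hg]
  | some ga =>
      have ha : ¬ga.1 = [] := by simpa using List.find?_some hfa
      cases hft : (pvSegments (toks.zip slots) [] []).reverse.find? (fun g => !g.2.isEmpty) with
      | none => simp [Option.elim, ha]
      | some gt =>
          have hg : ¬gt.2 = [] := by simpa using List.find?_some hft
          simp [Option.elim, ha, hg]
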